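-- pv_equiv track=rewrite | github.com/Roshan1115/PythonNTEL | Week8/PriyanshuCode.py | ldSet
-- ===== SOURCE A (Python) =====
-- def ldSet(arr, n):
--
--     divset = [0 for i in range(n)]
--
--     divset[0] = 1
--
--     for i in range(n):
--         divset[i] = 1
--         for j in range(i):
--             if (divset[j] != 0 and arr[i] % arr[j] == 0):
--                 divset[i] = max(divset[i], divset[j] + 1)
--
--     return max(divset)
-- ===== SOURCE B (Python) =====
-- def ldSet(arr, n):
--     memo = {}
--
--     def f(i):
--         if i in memo:
--             return memo[i]
--         best = 1
--         for j in range(i):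
--             v = f(j)
--             if arr[i] % arr[j] == 0 and v + 1 > best:
--                 best = v + 1
--         memo[i] = best
--         return best
--
--     return max(f(i) for i in range(n))
-- ===== Notes on version B (the rewrite author's own statement) =====
-- stated objective: alternative
-- what changed: Replaces A's bottom-up DP over a preallocated table with a memoized top-down recursion f(i) (dict cache) and a running max over f(i) for all i.
import Mathlib
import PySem

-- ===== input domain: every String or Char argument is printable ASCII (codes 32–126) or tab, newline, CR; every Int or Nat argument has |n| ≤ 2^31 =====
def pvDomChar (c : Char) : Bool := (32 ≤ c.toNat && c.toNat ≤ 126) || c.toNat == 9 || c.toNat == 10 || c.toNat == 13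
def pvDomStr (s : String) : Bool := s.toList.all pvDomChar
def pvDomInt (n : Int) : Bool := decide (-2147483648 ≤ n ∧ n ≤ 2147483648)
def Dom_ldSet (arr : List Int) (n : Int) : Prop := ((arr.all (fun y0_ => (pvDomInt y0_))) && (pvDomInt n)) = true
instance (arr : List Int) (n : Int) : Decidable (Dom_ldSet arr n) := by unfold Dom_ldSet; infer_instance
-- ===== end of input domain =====

-- B replaces A's bottom-up DP table with a memoized top-down recursion (same cost, different decomposition);
-- equivalence is proved on the inputs where the Python A returns normally (Pre_ldSet).

-- ===== PORT A =====
def ldSet (arr : List Int) (n : Int) : Int :=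
  -- divset = [0 for i in range(n)]
  let divset := (PySem.List.pyRange 0 n 1).map (fun _ => (0 : Int))
  -- divset[0] = 1   (IndexError when n ≤ 0: excluded by Pre_ldSet)
  let divset := PySem.List.pySetD divset 0 1
  -- for i in range(n): … for j in range(i): …
  let divset := (PySem.List.pyRange 0 n 1).foldl (fun ds i =>
      let ds := PySem.List.pySetD ds i 1
      (PySem.List.pyRange 0 i 1).foldl (fun ds j =>
        if PySem.List.pyGetD ds j 0 ≠ 0 ∧
            PySem.Int.mod (PySem.List.pyGetD arr i 0) (PySem.List.pyGetD arr j 0) = 0 then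
          PySem.List.pySetD ds i (max (PySem.List.pyGetD ds i 0) (PySem.List.pyGetD ds j 0 + 1))
        else ds) ds) divset
  -- return max(divset)
  (PySem.List.max? divset (fun y => y)).getD 0

-- ===== PORT B =====
-- f(i): longest divisibility chain ending at index i, memoized in `memo`; returns (value, updated memo)
mutual
def ldSetF (arr : List Int) (i : Nat) (memo : PySem.Dict Int Int) : Int × PySem.Dict Int Int :=
  match memo.get? (i : Int) with
  | some v => (v, memo)
  | none =>
    let r := ldSetLoop arr i 0 1 memo
    (r.1, r.2.insert (i : Int) r.1)
termination_by (i, 1, 0)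
decreasing_by exact Prod.Lex.right _ (Prod.Lex.left _ _ (by omega))

-- the `for j in range(i)` loop of f, threading best and memo
def ldSetLoop (arr : List Int) (i j : Nat) (best : Int) (memo : PySem.Dict Int Int) :
    Int × PySem.Dict Int Int :=
  if h : j < i then
    let r := ldSetF arr j memo
    let v := r.1
    let best' := if PySem.Int.mod (PySem.List.pyGetD arr (i : Int) 0)
                      (PySem.List.pyGetD arr (j : Int) 0) = 0 ∧ best < v + 1
                 then v + 1 else best
    ldSetLoop arr i (j + 1) best' r.2
  else (best, memo)
termination_by (i, 0, i - j)
decreasing_by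
  · exact Prod.Lex.left _ _ h
  · exact Prod.Lex.right _ (Prod.Lex.right _ (by omega))
end

-- return max(f(i) for i in range(n))   (ValueError on an empty range: excluded by Pre_ldSet)
def ldSet_alt (arr : List Int) (n : Int) : Int :=
  match PySem.List.pyRange 0 n 1 with
  | [] => 0
  | i0 :: rest =>
    let r0 := ldSetF arr i0.toNat PySem.Dict.empty
    (rest.foldl (fun (p : Int × PySem.Dict Int Int) i =>
        let r := ldSetF arr i.toNat p.2
        (max p.1 r.1, r.2)) r0).1

-- ===== PRECONDITION & SPEC =====
-- Pre_ldSet is exactly the inputs where the Python A returns: n ≥ 1 (else IndexError on divset[0]),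
-- n ≤ len(arr) (else IndexError on arr[i]), and no zero among the first n-1 elements (else ZeroDivisionError).
def Pre_ldSet (arr : List Int) (n : Int) : Prop :=
  1 ≤ n ∧ n ≤ (arr.length : Int) ∧ ∀ x ∈ arr.take (n - 1).toNat, x ≠ 0
instance (arr : List Int) (n : Int) : Decidable (Pre_ldSet arr n) := by unfold Pre_ldSet; infer_instance
def pvWitness_ldSet : List Int × Int := ([3, 6, 2, 12], 4)

def Spec_ldSet (arr : List Int) (n : Int) (out : Int) : Prop := out = ldSet_alt arr n
instance (arr : List Int) (n : Int) (out : Int) : Decidable (Spec_ldSet arr n out) := by unfold Spec_ldSet; infer_instance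

-- ===== CLAIM (what is proved, stated in full; the proofs are below) =====
def Claim_equal_ldSet : Prop := ∀ (arr : List Int) (n : Int), Dom_ldSet arr n → Pre_ldSet arr n → Spec_ldSet arr n (ldSet arr n)

-- ===== LEMMAS AND PROOFS =====

-- the chain-length recurrence, tabulated as a list (proof-only helper)
def dpStep (arr prev : List Int) (k : Nat) : Int :=
  (List.range k).foldl (fun b j =>
    if PySem.Int.mod (arr.getD k 0) (arr.getD j 0) = 0 then max b (prev.getD j 0 + 1) else b) 1

def dpList (arr : List Int) : Nat → List Int
  | 0 => []
  | k + 1 => dpList arr k ++ [dpStep arr (dpList arr k) k]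

def dpAt (arr : List Int) (i : Nat) : Int := dpStep arr (dpList arr i) i

def gstep (arr : List Int) (i : Nat) (b : Int) (j : Nat) : Int :=
  if PySem.Int.mod (arr.getD i 0) (arr.getD j 0) = 0 then max b (dpAt arr j + 1) else b

lemma dpList_eq_map (arr : List Int) (k : Nat) : dpList arr k = (List.range k).map (dpAt arr) := by
  induction k with
  | zero => simp [dpList]
  | succ k ih => simp [dpList, List.range_succ, ih, dpAt]

lemma dpList_length (arr : List Int) (k : Nat) : (dpList arr k).length = k := by
  rw [dpList_eq_map]; simp

lemma dpList_getD (arr : List Int) {j k : Nat} (h : j < k) :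
    (dpList arr k).getD j 0 = dpAt arr j := by
  rw [dpList_eq_map, List.getD_eq_getElem _ _ (by simpa using h)]
  simp

lemma le_foldl_gstep (arr : List Int) (i : Nat) (l : List Nat) :
    ∀ b : Int, b ≤ l.foldl (gstep arr i) b := by
  induction l with
  | nil => simp
  | cons x t ih =>
    intro b
    refine le_trans ?_ (ih (gstep arr i b x))
    unfold gstep; split <;> simp

lemma dpAt_eq (arr : List Int) (i : Nat) :
    dpAt arr i = (List.range i).foldl (gstep arr i) 1 := by
  unfold dpAt dpStep
  refine PySem.List.foldl_congr_mem _ _ _ _ (fun b j hj => ?_)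
  unfold gstep
  rw [dpList_getD arr (List.mem_range.mp hj)]

lemma one_le_dpAt (arr : List Int) (i : Nat) : 1 ≤ dpAt arr i := by
  rw [dpAt_eq]; exact le_foldl_gstep arr i _ 1

-- ==== A side ====

lemma innerA (arr : List Int) (i : Nat) (js : List Nat) :
    ∀ (s : List Int) (b : Int), (∀ j ∈ js, j < i) → i < s.length → s.take i = dpList arr i →
    (js.map (fun j : Nat => (j : Int))).foldl (fun ds j =>
        if PySem.List.pyGetD ds j 0 ≠ 0 ∧
            PySem.Int.mod (PySem.List.pyGetD arr (i : Int) 0) (PySem.List.pyGetD arr j 0) = 0 then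
          PySem.List.pySetD ds (i : Int) (max (PySem.List.pyGetD ds (i : Int) 0) (PySem.List.pyGetD ds j 0 + 1))
        else ds) (s.set i b)
      = s.set i (js.foldl (gstep arr i) b) := by
  induction js with
  | nil => intro s b _ _ _; simp
  | cons j t ih =>
    intro s b hjs hlen htake
    have hj : j < i := hjs j (by simp)
    have hgd : (s.set i b).getD j 0 = dpAt arr j := by
      rw [show ((s.set i b).getD j 0 = s.getD j 0) from by
            simp [List.getD, List.getElem?_set_ne (show i ≠ j by omega)]]
      rw [show s.getD j 0 = (s.take i).getD j 0 from by
            rw [List.getD_eq_getElem _ _ (by omega),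
                List.getD_eq_getElem _ _ (by simp; omega)]
            simp [List.getElem_take]]
      rw [htake, dpList_getD arr hj]
    have hgdi : (s.set i b).getD i 0 = b := by
      simp [List.getD, hlen]
    have hstep : (if PySem.List.pyGetD (s.set i b) (j : Int) 0 ≠ 0 ∧
            PySem.Int.mod (PySem.List.pyGetD arr (i : Int) 0) (PySem.List.pyGetD arr (j : Int) 0) = 0 then
          PySem.List.pySetD (s.set i b) (i : Int)
            (max (PySem.List.pyGetD (s.set i b) (i : Int) 0) (PySem.List.pyGetD (s.set i b) (j : Int) 0 + 1))
        else (s.set i b)) = s.set i (gstep arr i b j) := by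
      simp only [PySem.List.pyGetD_natCast, PySem.List.pySetD_natCast, hgd, hgdi]
      unfold gstep
      have h1 : (1 : Int) ≤ dpAt arr j := one_le_dpAt arr j
      by_cases hm : PySem.Int.mod (arr.getD i 0) (arr.getD j 0) = 0
      · rw [if_pos ⟨by omega, hm⟩, if_pos hm, List.set_set]
      · rw [if_neg (fun hc => hm hc.2), if_neg hm]
    rw [List.map_cons, List.foldl_cons, hstep]
    exact ih s (gstep arr i b j) (fun x hx => hjs x (List.mem_cons_of_mem _ hx)) hlen htake

lemma outerA (arr : List Int) (n' : Nat) :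
    ∀ (cnt i : Nat) (s : List Int), s.length = n' → i + cnt = n' → s.take i = dpList arr i →
    ((List.range' i cnt).map (fun k : Nat => (k : Int))).foldl (fun ds i =>
      (PySem.List.pyRange 0 i 1).foldl (fun ds j =>
        if PySem.List.pyGetD ds j 0 ≠ 0 ∧
            PySem.Int.mod (PySem.List.pyGetD arr i 0) (PySem.List.pyGetD arr j 0) = 0 then
          PySem.List.pySetD ds i (max (PySem.List.pyGetD ds i 0) (PySem.List.pyGetD ds j 0 + 1))
        else ds) (PySem.List.pySetD ds i 1)) s
      = dpList arr n' := by
  intro cnt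
  induction cnt with
  | zero =>
    intro i s hlen hin htake
    have : i = n' := by omega
    subst this
    simpa [← hlen] using htake
  | succ cnt ih =>
    intro i s hlen hin htake
    rw [List.range'_succ, List.map_cons, List.foldl_cons]
    have hiln : i < s.length := by omega
    have hset : PySem.List.pySetD s (i : Int) 1 = s.set i 1 := by
      simp [PySem.List.pySetD_natCast]
    have hrange := PySem.List.pyRange_zero_natCast i
    have hfold := innerA arr i (List.range i) s 1 (fun j hj => List.mem_range.mp hj) hiln htake
    rw [hset, hrange, hfold, ← dpAt_eq arr i]
    have htake' : (s.set i (dpAt arr i)).take (i + 1) = dpList arr (i + 1) := by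
      rw [List.set_eq_take_append_cons_drop, if_pos hiln]
      have hl : (s.take i).length = i := by simp; omega
      rw [List.take_append, hl, htake]
      simp [dpList, dpList_length, dpAt]
    exact ih (i + 1) _ (by simpa using hlen) (by omega) htake'

-- ==== B side ====

-- every value cached in the memo is the chain length of its index
def ValidMemo (arr : List Int) (memo : PySem.Dict Int Int) : Prop :=
  ∀ k v, memo.get? k = some v → v = dpAt arr k.toNat

lemma ldSetLoop_spec (arr : List Int) (i : Nat)
    (IH : ∀ j, j < i → ∀ memo, ValidMemo arr memo →
      (ldSetF arr j memo).1 = dpAt arr j ∧ ValidMemo arr (ldSetF arr j memo).2) :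
    ∀ (cnt j : Nat) (best : Int) (memo : PySem.Dict Int Int), j + cnt = i → ValidMemo arr memo →
      (ldSetLoop arr i j best memo).1 = (List.range' j cnt).foldl (gstep arr i) best ∧
      ValidMemo arr (ldSetLoop arr i j best memo).2 := by
  intro cnt
  induction cnt with
  | zero =>
    intro j best memo hji hv
    rw [ldSetLoop, dif_neg (by omega)]
    exact ⟨rfl, hv⟩
  | succ cnt ih =>
    intro j best memo hji hv
    have hj : j < i := by omega
    obtain ⟨h1, h2⟩ := IH j hj memo hv
    rw [ldSetLoop, dif_pos hj]
    dsimp only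
    have hbest : (if PySem.Int.mod (PySem.List.pyGetD arr (i : Int) 0)
          (PySem.List.pyGetD arr (j : Int) 0) = 0 ∧ best < (ldSetF arr j memo).1 + 1
        then (ldSetF arr j memo).1 + 1 else best) = gstep arr i best j := by
      rw [h1]
      simp only [PySem.List.pyGetD_natCast]
      unfold gstep
      by_cases hm : PySem.Int.mod (arr.getD i 0) (arr.getD j 0) = 0
      · rw [if_pos hm]
        by_cases hlt : best < dpAt arr j + 1
        · rw [if_pos ⟨hm, hlt⟩, max_eq_right (by omega)]
        · rw [if_neg (fun hc => hlt hc.2), max_eq_left (by omega)]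
      · rw [if_neg (fun hc => hm hc.1), if_neg hm]
    rw [hbest, List.range'_succ, List.foldl_cons]
    exact ih (j + 1) (gstep arr i best j) (ldSetF arr j memo).2 (by omega) h2

lemma ldSetF_spec (arr : List Int) : ∀ (i : Nat) (memo : PySem.Dict Int Int), ValidMemo arr memo →
    (ldSetF arr i memo).1 = dpAt arr i ∧ ValidMemo arr (ldSetF arr i memo).2 := by
  intro i
  induction i using Nat.strong_induction_on with
  | _ i IH =>
    intro memo hv
    rw [ldSetF]
    cases hm : memo.get? (i : Int) with
    | some v =>
      refine ⟨?_, hv⟩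
      have := hv _ _ hm
      simpa using this
    | none =>
      obtain ⟨h1, h2⟩ := ldSetLoop_spec arr i (fun j hj => IH j hj) i 0 1 memo (by omega) hv
      constructor
      · show (ldSetLoop arr i 0 1 memo).1 = dpAt arr i
        rw [h1, dpAt_eq, List.range_eq_range']
      · show ValidMemo arr (((ldSetLoop arr i 0 1 memo).2).insert (i : Int) (ldSetLoop arr i 0 1 memo).1)
        intro k v hk
        by_cases hki : k = (i : Int)
        · subst hki
          rw [PySem.Dict.get?_insert_self] at hk
          cases hk
          rw [h1, dpAt_eq, List.range_eq_range']
          simp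
        · rw [PySem.Dict.get?_insert_of_ne _ _ hki] at hk
          exact h2 _ _ hk

lemma foldB (arr : List Int) : ∀ (ks : List Nat) (p : Int × PySem.Dict Int Int),
    ValidMemo arr p.2 →
    ((ks.map (fun k : Nat => (k : Int))).foldl (fun (p : Int × PySem.Dict Int Int) i =>
        let r := ldSetF arr i.toNat p.2
        (max p.1 r.1, r.2)) p).1
      = ks.foldl (fun a k => max a (dpAt arr k)) p.1 := by
  intro ks
  induction ks with
  | nil => intro p _; rfl
  | cons k t ih =>
    intro p hv
    obtain ⟨h1, h2⟩ := ldSetF_spec arr k p.2 hv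
    rw [List.map_cons, List.foldl_cons, List.foldl_cons]
    have : (let r := ldSetF arr ((k : Int)).toNat p.2; ((max p.1 r.1, r.2) : Int × PySem.Dict Int Int))
        = (max p.1 (dpAt arr k), (ldSetF arr k p.2).2) := by
      simp only [Int.toNat_natCast, h1]
    rw [this]
    exact ih _ h2

lemma validMemo_empty (arr : List Int) : ValidMemo arr PySem.Dict.empty := by
  intro k v hk
  simp [PySem.Dict.get?_empty] at hk

-- ===== VERDICT (by name: the statement is the Claim_ definition above) =====
theorem ldSet_spec : Claim_equal_ldSet := by
  intro arr n _ hpre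
  obtain ⟨h1, hlen, -⟩ := hpre
  unfold Spec_ldSet
  have hn : n = (n.toNat : Int) := by omega
  have hn1 : 1 ≤ n.toNat := by omega
  obtain ⟨k0, ktail, hr⟩ : ∃ k0 ktail, List.range n.toNat = k0 :: ktail := by
    cases hrr : List.range n.toNat with
    | nil => exact absurd (congrArg List.length hrr) (by simp; omega)
    | cons a t => exact ⟨a, t, rfl⟩
  have hA : ldSet arr n = (PySem.List.max? (dpList arr n.toNat) (fun y => y)).getD 0 := by
    unfold ldSet
    dsimp only
    conv_lhs => rw [hn, PySem.List.pyRange_zero_natCast]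
    rw [show ∀ xs : List Int, PySem.List.pySetD xs 0 1 = xs.set 0 1 from fun xs => by simp [pysem]]
    rw [List.range_eq_range']
    rw [outerA arr n.toNat n.toNat 0 _ (by simp) (by omega) (by simp [dpList])]
  have hB : ldSet_alt arr n = ktail.foldl (fun a k => max a (dpAt arr k)) (dpAt arr k0) := by
    unfold ldSet_alt
    conv_lhs => rw [hn, PySem.List.pyRange_zero_natCast, hr, List.map_cons]
    dsimp only
    simp only [Int.toNat_natCast]
    obtain ⟨hf1, hf2⟩ := ldSetF_spec arr k0 PySem.Dict.empty (validMemo_empty arr)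
    rw [foldB arr ktail _ hf2, hf1]
  have hdp : dpList arr n.toNat = dpAt arr k0 :: List.map (dpAt arr) ktail := by
    rw [dpList_eq_map, hr, List.map_cons]
  rw [hA, hB, hdp, PySem.List.max?_id_cons, Option.getD_some, List.foldl_map]
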